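-- pv_equiv track=rewrite | github.com/SKORPIONZERO/PirateGame | MapGenerator.py | CheckTilesHidden
-- ===== SOURCE A (Python) =====
-- def CheckTilesHidden(Map, HiddenMap, object, order):
--     availableTiles = []
--     for row in range(len(Map)):
--         for column in range(len(Map[row])):
--             nearG = False
--             if Map[row][column] == ".":
--                 for i in [-1, 0, 1]:
--                     for j in [-1, 0, 1]:
--                         if (row+i >= 0 and row+i < len(Map)) and (column+j >= 0 and column+j < len(Map[0])):
--                             if HiddenMap[row+i][column+j] == "G":
--                                     nearG = True
--                 if object == "C":
--                     availableTiles.append([row, column])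
--                 else:
--                     if (nearG or order == 0) and object == "G":
--                         availableTiles.append([row, column])
--                     elif nearG and object == "T":
--                         availableTiles.append([row, column])
--     return availableTiles
-- ===== SOURCE B (Python) =====
-- def CheckTilesHidden(Map, HiddenMap, object, order):
--     if not Map:
--         return []
--     R, C = len(Map), len(Map[0])
--     near = set()
--     for grow in range(min(R, len(HiddenMap))):
--         hrow = HiddenMap[grow]
--         for gcol in range(min(C, len(hrow))):
--             if hrow[gcol] == "G":
--                 for i in (-1, 0, 1):
--                     for j in (-1, 0, 1):
--                         near.add((grow + i, gcol + j))
--     out = []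
--     for row, mrow in enumerate(Map):
--         for column, tile in enumerate(mrow):
--             if tile == ".":
--                 n = (row, column) in near
--                 if object == "C" or (object == "G" and (n or order == 0)) or (object == "T" and n):
--                     out.append([row, column])
--     return out
-- ===== Notes on version B (the rewrite author's own statement) =====
-- stated objective: alternative
-- what changed: Instead of scanning a 3x3 HiddenMap neighborhood for every '.' tile, B dilates the gold positions once into a set of nearby coordinates and the tile pass does a single set-membership test per cell.
import Mathlib
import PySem

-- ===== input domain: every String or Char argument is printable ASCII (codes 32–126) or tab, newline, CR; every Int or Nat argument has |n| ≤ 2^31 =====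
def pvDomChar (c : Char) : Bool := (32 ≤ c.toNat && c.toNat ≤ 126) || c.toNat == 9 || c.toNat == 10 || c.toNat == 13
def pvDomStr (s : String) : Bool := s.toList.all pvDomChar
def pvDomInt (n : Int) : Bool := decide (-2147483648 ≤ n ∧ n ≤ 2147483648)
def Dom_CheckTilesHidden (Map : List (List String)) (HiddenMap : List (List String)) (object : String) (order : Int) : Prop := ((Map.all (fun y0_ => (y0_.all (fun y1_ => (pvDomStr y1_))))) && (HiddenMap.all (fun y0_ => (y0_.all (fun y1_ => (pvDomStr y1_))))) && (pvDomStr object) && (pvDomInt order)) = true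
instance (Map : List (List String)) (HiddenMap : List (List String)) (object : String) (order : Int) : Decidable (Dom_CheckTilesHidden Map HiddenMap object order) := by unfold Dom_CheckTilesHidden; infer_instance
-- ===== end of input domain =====

-- B replaces A's per-tile 3x3 re-scan of HiddenMap by a one-time dilation of the gold
-- positions into a set, then one membership test per '.' tile (objective: alternative algorithm).

-- ===== PORT A =====
def CheckTilesHidden (Map : List (List String)) (HiddenMap : List (List String)) (object : String) (order : Int) : List (List Int) :=
  (PySem.List.pyRange 0 Map.length 1).foldl (fun acc row =>
    (PySem.List.pyRange 0 (PySem.List.pyGetD Map row []).length 1).foldl (fun acc column =>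
      let nearG := false
      if PySem.List.pyGetD (PySem.List.pyGetD Map row []) column "" = "." then
        let nearG := ([-1, 0, 1] : List Int).foldl (fun nearG i =>
          ([-1, 0, 1] : List Int).foldl (fun nearG j =>
            if (row + i ≥ 0 ∧ row + i < (Map.length : Int)) ∧
               (column + j ≥ 0 ∧ column + j < ((PySem.List.pyGetD Map 0 []).length : Int)) then
              if PySem.List.pyGetD (PySem.List.pyGetD HiddenMap (row + i) []) (column + j) "" = "G" then
                true
              else nearG
            else nearG) nearG) nearG
        if object = "C" then acc ++ [[row, column]]
        else if (nearG || decide (order = 0)) && decide (object = "G") then acc ++ [[row, column]]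
        else if nearG && decide (object = "T") then acc ++ [[row, column]]
        else acc
      else acc) acc) []

-- ===== PORT B =====
def CheckTilesHidden_alt (Map : List (List String)) (HiddenMap : List (List String)) (object : String) (order : Int) : List (List Int) :=
  if Map = [] then []
  else
    let R : Int := Map.length
    let C : Int := (Map.headD []).length
    let near : PySem.Set (Int × Int) :=
      (PySem.List.pyRange 0 (min R (HiddenMap.length : Int)) 1).foldl (fun near gr =>
        let hrow := PySem.List.pyGetD HiddenMap gr []
        (PySem.List.pyRange 0 (min C (hrow.length : Int)) 1).foldl (fun near gc =>
          if PySem.List.pyGetD hrow gc "" = "G" then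
            ([-1, 0, 1] : List Int).foldl (fun near i =>
              ([-1, 0, 1] : List Int).foldl (fun near j =>
                PySem.Set.add near (gr + i, gc + j)) near) near
          else near) near) PySem.Set.empty
    (PySem.List.enumerate Map 0).foldl (fun out p =>
      (PySem.List.enumerate p.2 0).foldl (fun out q =>
        if q.2 = "." then
          let n := PySem.Set.contains near (p.1, q.1)
          if decide (object = "C") || (decide (object = "G") && (n || decide (order = 0)))
             || (decide (object = "T") && n) then
            out ++ [[p.1, q.1]]
          else out
        else out) out) []

-- ===== PRECONDITION & SPEC =====
-- Pre_ excludes exactly the inputs where Python A raises IndexError: some '.' tile has an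
-- in-bounds (w.r.t. Map) neighbor position that lies outside HiddenMap.
def Pre_CheckTilesHidden (Map : List (List String)) (HiddenMap : List (List String)) (object : String) (order : Int) : Prop :=
  ((List.range Map.length).all (fun r =>
    (List.range (Map.getD r []).length).all (fun c =>
      !((Map.getD r []).getD c "" == ".") ||
      (List.range Map.length).all (fun a =>
        (List.range (Map.getD 0 []).length).all (fun b =>
          !(decide (a ≤ r + 1) && decide (r ≤ a + 1) && decide (b ≤ c + 1) && decide (c ≤ b + 1)) ||
          (decide (a < HiddenMap.length) && decide (b < (HiddenMap.getD a []).length))))))) = true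
instance (Map : List (List String)) (HiddenMap : List (List String)) (object : String) (order : Int) : Decidable (Pre_CheckTilesHidden Map HiddenMap object order) := by unfold Pre_CheckTilesHidden; infer_instance

def pvWitness_CheckTilesHidden : List (List String) × List (List String) × String × Int :=
  ([[".", "#"], [".", "."]], [["G", "."], [".", "."]], "T", 1)

def Spec_CheckTilesHidden (Map : List (List String)) (HiddenMap : List (List String)) (object : String) (order : Int) (out : List (List Int)) : Prop := out = CheckTilesHidden_alt Map HiddenMap object order
instance (Map : List (List String)) (HiddenMap : List (List String)) (object : String) (order : Int) (out : List (List Int)) : Decidable (Spec_CheckTilesHidden Map HiddenMap object order out) := by unfold Spec_CheckTilesHidden; infer_instance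

-- ===== CLAIM (what is proved, stated in full; the proofs are below) =====
def Claim_equal_CheckTilesHidden : Prop := ∀ (Map : List (List String)) (HiddenMap : List (List String)) (object : String) (order : Int), Dom_CheckTilesHidden Map HiddenMap object order → Pre_CheckTilesHidden Map HiddenMap object order → Spec_CheckTilesHidden Map HiddenMap object order (CheckTilesHidden Map HiddenMap object order)


-- ===== LEMMAS AND PROOFS =====

theorem pv_step_or (P Q : Prop) [Decidable P] [Decidable Q] (b : Bool) :
    (if P then (if Q then true else b) else b) = (b || (decide P && decide Q)) := by
  split_ifs <;> simp_all

-- generic: membership in a foldl over set-building steps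
theorem pv_mem_foldl_set {a b : Type} [BEq b] [LawfulBEq b] (y : b) (Q : a → Prop)
    (step : PySem.Set b → a → PySem.Set b)
    (h : ∀ s x, y ∈ step s x ↔ y ∈ s ∨ Q x) (l : List a) :
    ∀ (s : PySem.Set b), y ∈ l.foldl step s ↔ (y ∈ s ∨ ∃ x ∈ l, Q x) := by
  induction l with
  | nil => intro s; simp
  | cons x xs ih =>
      intro s
      rw [List.foldl_cons, ih, h]
      simp only [List.mem_cons]
      constructor
      · rintro ((hy | hq) | ⟨z, hz, hQ⟩)
        · exact Or.inl hy
        · exact Or.inr ⟨x, Or.inl rfl, hq⟩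
        · exact Or.inr ⟨z, Or.inr hz, hQ⟩
      · rintro (hy | ⟨z, (rfl | hz), hQ⟩)
        · exact Or.inl (Or.inl hy)
        · exact Or.inl (Or.inr hQ)
        · exact Or.inr ⟨z, hz, hQ⟩

theorem pv_foldl_flat {a b : Type} (l : List a) (f : List b → a → List b) (g : a → List b)
    (h : ∀ (acc : List b) (x : a), x ∈ l → f acc x = acc ++ g x) :
    ∀ (acc : List b), l.foldl f acc = acc ++ l.flatMap g := by
  induction l with
  | nil => intro acc; simp
  | cons x xs ih =>
      intro acc
      rw [List.foldl_cons, h acc x (by simp),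
        ih (fun a2 z hz => h a2 z (by simp [hz])) (acc ++ g x)]
      simp

theorem pv_pyGetD_oob {a : Type} (xs : List a) (i : Int) (d : a)
    (h : (xs.length : Int) ≤ i) : PySem.List.pyGetD xs i d = d := by
  have hn : PySem.List.pyGet? xs i = none := by
    rw [PySem.List.pyGet?_eq_none_iff]
    simp [PySem.Raise.InRange]
    omega
  simp [PySem.List.pyGetD, hn]

theorem pv_head_eq (Map : List (List String)) :
    PySem.List.pyGetD Map 0 [] = Map.headD [] := by
  cases Map <;> simp [PySem.List.pyGetD_zero, List.getD]

def pvNearB (Map HiddenMap : List (List String)) (row column : Int) : Bool :=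
  ([-1, 0, 1] : List Int).any (fun i => ([-1, 0, 1] : List Int).any (fun j =>
    decide ((row + i ≥ 0 ∧ row + i < (Map.length : Int)) ∧
            (column + j ≥ 0 ∧ column + j < ((PySem.List.pyGetD Map 0 []).length : Int))) &&
    decide (PySem.List.pyGetD (PySem.List.pyGetD HiddenMap (row + i) []) (column + j) "" = "G")))

def pvChunk (object : String) (order : Int) (n : Bool) (row column : Int) : List (List Int) :=
  if object = "C" then [[row, column]]
  else if (n || decide (order = 0)) && decide (object = "G") then [[row, column]]
  else if n && decide (object = "T") then [[row, column]]
  else []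

def pvCellA (Map HiddenMap : List (List String)) (object : String) (order : Int) (row column : Int) : List (List Int) :=
  if PySem.List.pyGetD (PySem.List.pyGetD Map row []) column "" = "." then
    pvChunk object order (pvNearB Map HiddenMap row column) row column
  else []

def pvNearSet (Map HiddenMap : List (List String)) : PySem.Set (Int × Int) :=
  (PySem.List.pyRange 0 (min (Map.length : Int) (HiddenMap.length : Int)) 1).foldl (fun near gr =>
    (PySem.List.pyRange 0 (min ((Map.headD []).length : Int) ((PySem.List.pyGetD HiddenMap gr []).length : Int)) 1).foldl (fun near gc =>
      if PySem.List.pyGetD (PySem.List.pyGetD HiddenMap gr []) gc "" = "G" then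
        ([-1, 0, 1] : List Int).foldl (fun near i =>
          ([-1, 0, 1] : List Int).foldl (fun near j =>
            PySem.Set.add near (gr + i, gc + j)) near) near
      else near) near) PySem.Set.empty

theorem pv_branch (o : String) (d : Int) (n : Bool) (acc : List (List Int)) (r c : Int) :
    (if o = "C" then acc ++ [[r, c]]
     else if (n || decide (d = 0)) && decide (o = "G") then acc ++ [[r, c]]
     else if n && decide (o = "T") then acc ++ [[r, c]]
     else acc) = acc ++ pvChunk o d n r c := by
  unfold pvChunk
  split_ifs <;> simp

-- A's inner 3x3 scan computes pvNearB
theorem pv_nearG_eq (Map HiddenMap : List (List String)) (row column : Int) :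
    (([-1, 0, 1] : List Int).foldl (fun nearG i =>
      ([-1, 0, 1] : List Int).foldl (fun nearG j =>
        if (row + i ≥ 0 ∧ row + i < (Map.length : Int)) ∧
           (column + j ≥ 0 ∧ column + j < ((PySem.List.pyGetD Map 0 []).length : Int)) then
          if PySem.List.pyGetD (PySem.List.pyGetD HiddenMap (row + i) []) (column + j) "" = "G" then
            true
          else nearG
        else nearG) nearG) false) = pvNearB Map HiddenMap row column := by
  simp only [List.foldl_cons, List.foldl_nil, pv_step_or, pvNearB, List.any_cons, List.any_nil,
    Bool.or_false, Bool.false_or, Bool.or_assoc]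

-- membership in the dilated set
theorem pv_mem_nearSet (Map HiddenMap : List (List String)) (y : Int × Int) :
    y ∈ pvNearSet Map HiddenMap ↔
      ∃ gr, (0 ≤ gr ∧ gr < min (Map.length : Int) (HiddenMap.length : Int)) ∧
        ∃ gc, (0 ≤ gc ∧ gc < min ((Map.headD []).length : Int) ((PySem.List.pyGetD HiddenMap gr []).length : Int)) ∧
          PySem.List.pyGetD (PySem.List.pyGetD HiddenMap gr []) gc "" = "G" ∧
          ∃ i ∈ ([-1, 0, 1] : List Int), ∃ j ∈ ([-1, 0, 1] : List Int), y = (gr + i, gc + j) := by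
  unfold pvNearSet
  rw [pv_mem_foldl_set (b := Int × Int) y
    (Q := fun gr => ∃ gc ∈ PySem.List.pyRange 0 (min ((Map.headD []).length : Int) ((PySem.List.pyGetD HiddenMap gr []).length : Int)) 1,
      PySem.List.pyGetD (PySem.List.pyGetD HiddenMap gr []) gc "" = "G" ∧
      ∃ i ∈ ([-1, 0, 1] : List Int), ∃ j ∈ ([-1, 0, 1] : List Int), y = (gr + i, gc + j))]
  · simp only [PySem.List.mem_pyRange_one]
    constructor
    · rintro (hy | ⟨gr, hgr, gc, hgc, hrest⟩)
      · simp [PySem.Set.empty] at hy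
      · exact ⟨gr, hgr, gc, hgc, hrest⟩
    · rintro ⟨gr, hgr, gc, hgc, hrest⟩
      exact Or.inr ⟨gr, hgr, gc, hgc, hrest⟩
  · intro s gr
    rw [pv_mem_foldl_set (b := Int × Int) y
      (Q := fun gc => PySem.List.pyGetD (PySem.List.pyGetD HiddenMap gr []) gc "" = "G" ∧
        ∃ i ∈ ([-1, 0, 1] : List Int), ∃ j ∈ ([-1, 0, 1] : List Int), y = (gr + i, gc + j))]
    intro s gc
    by_cases hG : PySem.List.pyGetD (PySem.List.pyGetD HiddenMap gr []) gc "" = "G"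
    · rw [if_pos hG]
      rw [pv_mem_foldl_set (b := Int × Int) y (Q := fun i => ∃ j ∈ ([-1, 0, 1] : List Int), y = (gr + i, gc + j))]
      · tauto
      · intro s i
        rw [pv_mem_foldl_set (b := Int × Int) y (Q := fun j => y = (gr + i, gc + j))]
        intro s j
        simp [PySem.Set.mem_add]
    · rw [if_neg hG]
      tauto

theorem pv_neg_mem_l3 (i : Int) (h : i ∈ ([-1, 0, 1] : List Int)) : -i ∈ ([-1, 0, 1] : List Int) := by
  simp at h ⊢
  omega

-- the key bridge: set membership = A's 3x3 scan
theorem pv_contains_eq_nearB (Map HiddenMap : List (List String)) (row column : Int) :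
    PySem.Set.contains (pvNearSet Map HiddenMap) (row, column) = pvNearB Map HiddenMap row column := by
  rw [Bool.eq_iff_iff, PySem.Set.contains_iff, pv_mem_nearSet]
  have hC : PySem.List.pyGetD Map 0 [] = Map.headD [] := pv_head_eq Map
  constructor
  · rintro ⟨gr, ⟨hgr0, hgrlt⟩, gc, ⟨hgc0, hgclt⟩, hG, i, hi, j, hj, hy⟩
    rw [lt_min_iff] at hgrlt hgclt
    have hrow : row = gr + i := by exact congrArg Prod.fst hy
    have hcol : column = gc + j := by exact congrArg Prod.snd hy
    simp only [pvNearB, List.any_eq_true]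
    refine ⟨-i, pv_neg_mem_l3 i hi, -j, pv_neg_mem_l3 j hj, ?_⟩
    have h1 : row + -i = gr := by omega
    have h2 : column + -j = gc := by omega
    rw [h1, h2, hC]
    simp only [Bool.and_eq_true, decide_eq_true_eq]
    exact ⟨⟨⟨by omega, hgrlt.1⟩, ⟨by omega, hgclt.1⟩⟩, hG⟩
  · intro h
    simp only [pvNearB, List.any_eq_true, Bool.and_eq_true, decide_eq_true_eq] at h
    obtain ⟨i, hi, j, hj, ⟨⟨hr0, hrlt⟩, ⟨hc0, hclt⟩⟩, hG⟩ := h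
    rw [hC] at hclt
    have hgrH : row + i < (HiddenMap.length : Int) := by
      by_contra hcon
      rw [pv_pyGetD_oob HiddenMap (row + i) [] (by omega)] at hG
      rw [pv_pyGetD_oob ([] : List String) (column + j) "" (by simp; omega)] at hG
      exact absurd hG (by decide)
    have hgcH : column + j < ((PySem.List.pyGetD HiddenMap (row + i) []).length : Int) := by
      by_contra hcon
      rw [pv_pyGetD_oob _ (column + j) "" (by omega)] at hG
      exact absurd hG (by decide)
    refine ⟨row + i, ⟨by omega, by rw [lt_min_iff]; exact ⟨hrlt, hgrH⟩⟩,
            column + j, ⟨by omega, by rw [lt_min_iff]; exact ⟨hclt, hgcH⟩⟩, hG,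
            -i, pv_neg_mem_l3 i hi, -j, pv_neg_mem_l3 j hj, ?_⟩
    have : row + i + -i = row := by omega
    have h2 : column + j + -j = column := by omega
    rw [this, h2]

theorem pv_chunk_eq (o : String) (d : Int) (n : Bool) (r c : Int) :
    pvChunk o d n r c =
      (if decide (o = "C") || (decide (o = "G") && (n || decide (d = 0))) || (decide (o = "T") && n)
       then [[r, c]] else []) := by
  unfold pvChunk
  by_cases h1 : o = "C" <;> by_cases h2 : o = "G" <;> by_cases h3 : o = "T" <;>
    cases n <;> by_cases h4 : d = 0 <;> simp_all

theorem pv_flatMap_congr {a b : Type} (l : List a) (f g : a → List b)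
    (h : ∀ x ∈ l, f x = g x) : l.flatMap f = l.flatMap g := by
  induction l with
  | nil => rfl
  | cons x xs ih =>
      simp only [List.flatMap_cons, h x (List.mem_cons_self), ih (fun z hz => h z (List.mem_cons_of_mem x hz))]

-- A in flatMap form
theorem pv_A_flat (Map HiddenMap : List (List String)) (object : String) (order : Int) :
    CheckTilesHidden Map HiddenMap object order =
      (PySem.List.pyRange 0 Map.length 1).flatMap (fun row =>
        (PySem.List.pyRange 0 (PySem.List.pyGetD Map row []).length 1).flatMap (fun column =>
          pvCellA Map HiddenMap object order row column)) := by
  unfold CheckTilesHidden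
  refine (pv_foldl_flat _ _
      (fun row => (PySem.List.pyRange 0 (PySem.List.pyGetD Map row []).length 1).flatMap (fun column =>
        pvCellA Map HiddenMap object order row column)) ?_ []).trans (List.nil_append _)
  intro acc row _
  refine pv_foldl_flat _ _ (fun column => pvCellA Map HiddenMap object order row column) ?_ acc
  intro acc2 column _
  show (if PySem.List.pyGetD (PySem.List.pyGetD Map row []) column "" = "." then _ else acc2)
      = acc2 ++ pvCellA Map HiddenMap object order row column
  unfold pvCellA
  rw [pv_nearG_eq]
  by_cases htile : PySem.List.pyGetD (PySem.List.pyGetD Map row []) column "" = "."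
  · rw [if_pos htile, if_pos htile]
    exact pv_branch object order (pvNearB Map HiddenMap row column) acc2 row column
  · rw [if_neg htile, if_neg htile]
    simp

-- B in flatMap form
theorem pv_B_flat (Map HiddenMap : List (List String)) (object : String) (order : Int)
    (hM : Map ≠ []) :
    CheckTilesHidden_alt Map HiddenMap object order =
      (PySem.List.pyRange 0 Map.length 1).flatMap (fun row =>
        (PySem.List.pyRange 0 (PySem.List.pyGetD Map row []).length 1).flatMap (fun column =>
          if PySem.List.pyGetD (PySem.List.pyGetD Map row []) column "" = "." then
            (if decide (object = "C") ||
                (decide (object = "G") && (PySem.Set.contains (pvNearSet Map HiddenMap) (row, column) || decide (order = 0))) ||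
                (decide (object = "T") && PySem.Set.contains (pvNearSet Map HiddenMap) (row, column))
             then [[row, column]] else [])
          else [])) := by
  have hstart : CheckTilesHidden_alt Map HiddenMap object order =
      (PySem.List.enumerate Map 0).foldl (fun out p =>
        (PySem.List.enumerate p.2 0).foldl (fun out q =>
          if q.2 = "." then
            if decide (object = "C") ||
               (decide (object = "G") && (PySem.Set.contains (pvNearSet Map HiddenMap) (p.1, q.1) || decide (order = 0))) ||
               (decide (object = "T") && PySem.Set.contains (pvNearSet Map HiddenMap) (p.1, q.1)) then
              out ++ [[p.1, q.1]]
            else out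
          else out) out) [] := by
    unfold CheckTilesHidden_alt pvNearSet
    rw [if_neg hM]
  rw [hstart]
  have hmain : (PySem.List.enumerate Map 0).foldl (fun out p =>
      (PySem.List.enumerate p.2 0).foldl (fun out q =>
        if q.2 = "." then
          if decide (object = "C") ||
             (decide (object = "G") && (PySem.Set.contains (pvNearSet Map HiddenMap) (p.1, q.1) || decide (order = 0))) ||
             (decide (object = "T") && PySem.Set.contains (pvNearSet Map HiddenMap) (p.1, q.1)) then
            out ++ [[p.1, q.1]]
          else out
        else out) out) [] =
      (PySem.List.enumerate Map 0).flatMap (fun p =>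
        (PySem.List.enumerate p.2 0).flatMap (fun q =>
          if q.2 = "." then
            (if decide (object = "C") ||
                (decide (object = "G") && (PySem.Set.contains (pvNearSet Map HiddenMap) (p.1, q.1) || decide (order = 0))) ||
                (decide (object = "T") && PySem.Set.contains (pvNearSet Map HiddenMap) (p.1, q.1))
             then [[p.1, q.1]] else [])
          else [])) := by
    refine (pv_foldl_flat _ _ _ ?_ []).trans (List.nil_append _)
    intro out p _
    refine pv_foldl_flat _ _ (fun (q : Int × String) =>
      if q.2 = "." then
        (if decide (object = "C") ||
            (decide (object = "G") && (PySem.Set.contains (pvNearSet Map HiddenMap) (p.1, q.1) || decide (order = 0))) ||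
            (decide (object = "T") && PySem.Set.contains (pvNearSet Map HiddenMap) (p.1, q.1))
         then [[p.1, q.1]] else [])
      else []) ?_ out
    intro acc q _
    beta_reduce
    split_ifs <;> simp
  rw [hmain]
  rw [PySem.List.enumerate_eq_map_pyRange Map ([] : List String), List.flatMap_map]
  apply pv_flatMap_congr
  intro row _
  rw [PySem.List.enumerate_eq_map_pyRange (PySem.List.pyGetD Map row []) ("" : String), List.flatMap_map]
  rfl

theorem ports_eq (Map HiddenMap : List (List String)) (object : String) (order : Int) :
    CheckTilesHidden Map HiddenMap object order = CheckTilesHidden_alt Map HiddenMap object order := by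
  by_cases hM : Map = []
  · subst hM
    unfold CheckTilesHidden CheckTilesHidden_alt
    rw [if_pos rfl]
    rw [show PySem.List.pyRange 0 (List.length ([] : List (List String))) 1 = [] from by
      simp [PySem.List.pyRange_one_eq_nil]]
    rfl
  · rw [pv_A_flat, pv_B_flat Map HiddenMap object order hM]
    apply pv_flatMap_congr
    intro row _
    apply pv_flatMap_congr
    intro column _
    unfold pvCellA
    by_cases htile : PySem.List.pyGetD (PySem.List.pyGetD Map row []) column "" = "."
    · rw [if_pos htile, if_pos htile, pv_chunk_eq, pv_contains_eq_nearB]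
    · rw [if_neg htile, if_neg htile]

-- ===== VERDICT (by name: the statement is the Claim_ definition above) =====
theorem CheckTilesHidden_spec : Claim_equal_CheckTilesHidden := by
  intro Map HiddenMap object order _ _
  unfold Spec_CheckTilesHidden
  exact ports_eq Map HiddenMap object order
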